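-- pv_equiv track=rewrite | github.com/Yuv-Raj-01/Student-Evaluation-and-Result-Management-System | Student evaluation code.py | round_to_category
-- ===== SOURCE A (Python) =====
-- def round_to_category(num) :
--     """
--     This function is for roundup the overall score as required.
--     Here, Parameter is the raw overall score that we get after the calculation.
--     And In last this function will roundup according to the requirement and return the roundup score.
--     """
--
--     # the list scores contain the mark that program accept as per as requirement
--     scores = [0, 5, 15, 25, 32, 35, 38, 42, 45, 48, 52, 55, 58, 62, 65, 68, 72, 75, 78, 82, 85, 92, 100]
--     Raw_score = num
--
--     # here we create the empty list to store the difference to find the nearest mark that can be accepted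
--     difference = []
--     for score in scores :
--         difference.append(abs(score - Raw_score))
--     min_difference = min(difference)
--     if difference.count(min_difference) == 1 :
--         index_of_scores = difference.index(min_difference)
--     else :
--         index_of_scores = difference.index(min_difference) + 1
--
--     category = determine_category(scores[index_of_scores])
--
--     return scores[index_of_scores],category
--
-- def determine_category(overall_score):
--
--     """
--     This function are for determine the category of student as mentioned in question or required for assessment.
--     """
--     if overall_score == 100:
--         return "Aurum Standard"
--     elif 82 <= overall_score <= 92:
--         return "Upper First"
--     elif 72 <= overall_score <= 78:
--         return "First"
--     elif 62 <= overall_score <= 68: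
--         return "2:1"
--     elif 52 <= overall_score <= 58:
--         return "2:2"
--     elif 42 <= overall_score <= 48:
--         return "Third"
--     elif 32 <= overall_score <= 38:
--         return "Condonable Fail"
--     elif 5 <= overall_score <= 25:
--         return "Fail"
--     elif overall_score > 100 or overall_score < 0 :
--         return "Ungraded"
--     else :
--         return "Defecit Opus"
-- ===== SOURCE B (Python) =====
-- def round_to_category(num):
--     """Snap the raw score to the nearest allowed score via binary search
--     (ties go to the higher score) and return it with its category."""
--     scores = [0, 5, 15, 25, 32, 35, 38, 42, 45, 48, 52, 55, 58, 62, 65, 68, 72, 75, 78, 82, 85, 92, 100]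
--     # hand-written bisect_left (A imports nothing, so no bisect module)
--     lo, hi = 0, len(scores)
--     while lo < hi:
--         mid = (lo + hi) // 2
--         if scores[mid] < num:
--             lo = mid + 1
--         else:
--             hi = mid
--     i = lo
--     if i == 0:
--         best = scores[0]
--     elif i == len(scores):
--         best = scores[-1]
--     else:
--         left, right = scores[i - 1], scores[i]
--         best = left if num - left < right - num else right
--     return best, determine_category(best)
--
-- def determine_category(overall_score):
--     if overall_score == 100:
--         return "Aurum Standard"
--     elif 82 <= overall_score <= 92:
--         return "Upper First"
--     elif 72 <= overall_score <= 78: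
--         return "First"
--     elif 62 <= overall_score <= 68:
--         return "2:1"
--     elif 52 <= overall_score <= 58:
--         return "2:2"
--     elif 42 <= overall_score <= 48:
--         return "Third"
--     elif 32 <= overall_score <= 38:
--         return "Condonable Fail"
--     elif 5 <= overall_score <= 25:
--         return "Fail"
--     elif overall_score > 100 or overall_score < 0:
--         return "Ungraded"
--     else:
--         return "Defecit Opus"
-- ===== Notes on version B (the rewrite author's own statement) =====
-- stated objective: alternative
-- what changed: Replaces A's full difference-list pass with min/count/index scans by a hand-written binary search (bisect_left) that locates the two neighbouring allowed scores and picks the closer one, tie going to the higher score.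
import Mathlib
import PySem

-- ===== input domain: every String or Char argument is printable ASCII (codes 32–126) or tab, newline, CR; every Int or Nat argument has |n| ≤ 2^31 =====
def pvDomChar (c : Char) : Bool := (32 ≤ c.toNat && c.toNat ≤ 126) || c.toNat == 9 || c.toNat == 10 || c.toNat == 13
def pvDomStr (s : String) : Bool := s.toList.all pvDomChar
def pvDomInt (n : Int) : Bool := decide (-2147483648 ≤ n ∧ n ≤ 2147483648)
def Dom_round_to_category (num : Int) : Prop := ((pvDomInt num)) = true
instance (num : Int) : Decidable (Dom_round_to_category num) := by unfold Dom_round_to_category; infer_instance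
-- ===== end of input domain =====

-- B replaces A's difference-list pass (min/count/index scans) by a hand-written
-- bisect_left over the same sorted table, picking the closer of the two
-- neighbouring scores with ties going to the higher one (objective: alternative).

-- shared helpers (identical in both Python sources)
def pvScores : List Int := [0, 5, 15, 25, 32, 35, 38, 42, 45, 48, 52, 55, 58, 62, 65, 68, 72, 75, 78, 82, 85, 92, 100]

def determine_category (overall_score : Int) : String :=
  if overall_score = 100 then "Aurum Standard"
  else if 82 ≤ overall_score ∧ overall_score ≤ 92 then "Upper First"
  else if 72 ≤ overall_score ∧ overall_score ≤ 78 then "First"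
  else if 62 ≤ overall_score ∧ overall_score ≤ 68 then "2:1"
  else if 52 ≤ overall_score ∧ overall_score ≤ 58 then "2:2"
  else if 42 ≤ overall_score ∧ overall_score ≤ 48 then "Third"
  else if 32 ≤ overall_score ∧ overall_score ≤ 38 then "Condonable Fail"
  else if 5 ≤ overall_score ∧ overall_score ≤ 25 then "Fail"
  else if overall_score > 100 ∨ overall_score < 0 then "Ungraded"
  else "Defecit Opus"

-- ===== PORT A =====
def round_to_category (num : Int) : Int × String :=
  let Raw_score := num
  let difference := pvScores.foldl (fun acc score => acc ++ [|score - Raw_score|]) []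
  let min_difference := (PySem.List.min? difference (fun x => x)).getD 0
  let index_of_scores :=
    if PySem.List.count difference min_difference = 1 then
      (PySem.List.index? difference min_difference).getD 0
    else
      (PySem.List.index? difference min_difference).getD 0 + 1
  let sc := (PySem.List.pyGet? pvScores (index_of_scores : Int)).getD 0
  (sc, determine_category sc)

-- ===== PORT B =====
-- the while-loop of B's hand-written bisect_left; fuel = pvScores.length bounds
-- its iterations (hi - lo shrinks by at least 1 every pass)
def bsLoop (num : Int) : Nat → Nat → Nat → Nat
  | 0, lo, _ => lo
  | fuel + 1, lo, hi =>
    if lo < hi then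
      let mid := (lo + hi) / 2
      if (PySem.List.pyGet? pvScores (mid : Int)).getD 0 < num then bsLoop num fuel (mid + 1) hi
      else bsLoop num fuel lo mid
    else lo

def round_to_category_alt (num : Int) : Int × String :=
  let i := bsLoop num pvScores.length 0 pvScores.length
  let best :=
    if i = 0 then (PySem.List.pyGet? pvScores 0).getD 0
    else if i = pvScores.length then (PySem.List.pyGet? pvScores (-1)).getD 0
    else
      let left := (PySem.List.pyGet? pvScores ((i : Int) - 1)).getD 0
      let right := (PySem.List.pyGet? pvScores (i : Int)).getD 0
      if num - left < right - num then left else right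
  (best, determine_category best)

-- ===== PRECONDITION & SPEC =====
def Spec_round_to_category (num : Int) (out : Int × String) : Prop := out = round_to_category_alt num
instance (num : Int) (out : Int × String) : Decidable (Spec_round_to_category num out) := by unfold Spec_round_to_category; infer_instance

-- ===== CLAIM (what is proved, stated in full; the proofs are below) =====
def Claim_equal_round_to_category : Prop := ∀ (num : Int), Dom_round_to_category num → Spec_round_to_category num (round_to_category num)

-- ===== LEMMAS AND PROOFS =====
theorem pvGetD_nonneg (i : Int) : 0 ≤ (PySem.List.pyGet? pvScores i).getD 0 := by
  rcases h : PySem.List.pyGet? pvScores i with _ | x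
  · simp
  · have hm := PySem.List.mem_of_pyGet?_eq_some pvScores h
    simp only [pvScores, List.mem_cons, List.not_mem_nil, or_false] at hm
    simp only [Option.getD_some]
    omega

theorem pvGetD_le (i : Int) : (PySem.List.pyGet? pvScores i).getD 0 ≤ 100 := by
  rcases h : PySem.List.pyGet? pvScores i with _ | x
  · simp
  · have hm := PySem.List.mem_of_pyGet?_eq_some pvScores h
    simp only [pvScores, List.mem_cons, List.not_mem_nil, or_false] at hm
    simp only [Option.getD_some]
    omega

theorem bsLoop_neg (num : Int) (h : num < 0) : ∀ (fuel lo hi : Nat), bsLoop num fuel lo hi = lo := by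
  intro fuel
  induction fuel with
  | zero => intro lo hi; rfl
  | succ n ih =>
    intro lo hi
    simp only [bsLoop]
    by_cases hlh : lo < hi
    · rw [if_pos hlh, if_neg (by have := pvGetD_nonneg (((lo + hi) / 2 : Nat) : Int); omega)]
      exact ih lo ((lo + hi) / 2)
    · rw [if_neg hlh]

theorem bsLoop_big (num : Int) (h : 100 < num) : ∀ (fuel lo hi : Nat), hi - lo ≤ fuel → lo ≤ hi → bsLoop num fuel lo hi = hi := by
  intro fuel
  induction fuel with
  | zero =>
    intro lo hi h1 h2
    have hlh : lo = hi := by omega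
    rw [hlh]
    rfl
  | succ n ih =>
    intro lo hi h1 h2
    simp only [bsLoop]
    by_cases hlh : lo < hi
    · rw [if_pos hlh, if_pos (by have := pvGetD_le (((lo + hi) / 2 : Nat) : Int); omega)]
      exact ih ((lo + hi) / 2 + 1) hi (by omega) (by omega)
    · rw [if_neg hlh]; omega

theorem rtc_neg (num : Int) (h : num < 0) : round_to_category num = (0, "Defecit Opus") := by
  simp only [round_to_category, PySem.List.foldl_append_singleton_eq_map, List.nil_append,
    pvScores, List.map_cons, List.map_nil]
  rw [show |(0:Int) - num| = 0 - num from abs_of_nonneg (by omega)]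
  rw [show |(5:Int) - num| = 5 - num from abs_of_nonneg (by omega)]
  rw [show |(15:Int) - num| = 15 - num from abs_of_nonneg (by omega)]
  rw [show |(25:Int) - num| = 25 - num from abs_of_nonneg (by omega)]
  rw [show |(32:Int) - num| = 32 - num from abs_of_nonneg (by omega)]
  rw [show |(35:Int) - num| = 35 - num from abs_of_nonneg (by omega)]
  rw [show |(38:Int) - num| = 38 - num from abs_of_nonneg (by omega)]
  rw [show |(42:Int) - num| = 42 - num from abs_of_nonneg (by omega)]
  rw [show |(45:Int) - num| = 45 - num from abs_of_nonneg (by omega)]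
  rw [show |(48:Int) - num| = 48 - num from abs_of_nonneg (by omega)]
  rw [show |(52:Int) - num| = 52 - num from abs_of_nonneg (by omega)]
  rw [show |(55:Int) - num| = 55 - num from abs_of_nonneg (by omega)]
  rw [show |(58:Int) - num| = 58 - num from abs_of_nonneg (by omega)]
  rw [show |(62:Int) - num| = 62 - num from abs_of_nonneg (by omega)]
  rw [show |(65:Int) - num| = 65 - num from abs_of_nonneg (by omega)]
  rw [show |(68:Int) - num| = 68 - num from abs_of_nonneg (by omega)]
  rw [show |(72:Int) - num| = 72 - num from abs_of_nonneg (by omega)]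
  rw [show |(75:Int) - num| = 75 - num from abs_of_nonneg (by omega)]
  rw [show |(78:Int) - num| = 78 - num from abs_of_nonneg (by omega)]
  rw [show |(82:Int) - num| = 82 - num from abs_of_nonneg (by omega)]
  rw [show |(85:Int) - num| = 85 - num from abs_of_nonneg (by omega)]
  rw [show |(92:Int) - num| = 92 - num from abs_of_nonneg (by omega)]
  rw [show |(100:Int) - num| = 100 - num from abs_of_nonneg (by omega)]
  rw [PySem.List.min?_id_cons]
  simp only [List.foldl_cons, List.foldl_nil]
  rw [show min ((0:Int) - num) (5 - num) = 0 - num from by omega]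
  rw [show min ((0:Int) - num) (15 - num) = 0 - num from by omega]
  rw [show min ((0:Int) - num) (25 - num) = 0 - num from by omega]
  rw [show min ((0:Int) - num) (32 - num) = 0 - num from by omega]
  rw [show min ((0:Int) - num) (35 - num) = 0 - num from by omega]
  rw [show min ((0:Int) - num) (38 - num) = 0 - num from by omega]
  rw [show min ((0:Int) - num) (42 - num) = 0 - num from by omega]
  rw [show min ((0:Int) - num) (45 - num) = 0 - num from by omega]
  rw [show min ((0:Int) - num) (48 - num) = 0 - num from by omega]
  rw [show min ((0:Int) - num) (52 - num) = 0 - num from by omega]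
  rw [show min ((0:Int) - num) (55 - num) = 0 - num from by omega]
  rw [show min ((0:Int) - num) (58 - num) = 0 - num from by omega]
  rw [show min ((0:Int) - num) (62 - num) = 0 - num from by omega]
  rw [show min ((0:Int) - num) (65 - num) = 0 - num from by omega]
  rw [show min ((0:Int) - num) (68 - num) = 0 - num from by omega]
  rw [show min ((0:Int) - num) (72 - num) = 0 - num from by omega]
  rw [show min ((0:Int) - num) (75 - num) = 0 - num from by omega]
  rw [show min ((0:Int) - num) (78 - num) = 0 - num from by omega]
  rw [show min ((0:Int) - num) (82 - num) = 0 - num from by omega]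
  rw [show min ((0:Int) - num) (85 - num) = 0 - num from by omega]
  rw [show min ((0:Int) - num) (92 - num) = 0 - num from by omega]
  rw [show min ((0:Int) - num) (100 - num) = 0 - num from by omega]
  simp only [Option.getD_some]
  rw [show PySem.List.count ((0 - num) :: [5 - num, 15 - num, 25 - num, 32 - num, 35 - num, 38 - num, 42 - num, 45 - num, 48 - num, 52 - num, 55 - num, 58 - num, 62 - num, 65 - num, 68 - num, 72 - num, 75 - num, 78 - num, 82 - num, 85 - num, 92 - num, 100 - num]) (0 - num) = 1 from by
    rw [PySem.List.count_eq]
    rw [List.count_cons_self]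
    rw [List.count_eq_zero.mpr (by simp only [List.mem_cons, List.not_mem_nil, or_false]; omega)]]
  rw [if_pos rfl, PySem.List.index?_cons_self]
  norm_num [PySem.List.pyGet?, PySem.List.pyIdx?, determine_category, pvScores]

theorem rtc_alt_neg (num : Int) (h : num < 0) : round_to_category_alt num = (0, "Defecit Opus") := by
  simp only [round_to_category_alt, bsLoop_neg num h]
  norm_num [PySem.List.pyGet?, PySem.List.pyIdx?, determine_category, pvScores]

theorem rtc_big (num : Int) (h : 100 < num) : round_to_category num = (100, "Aurum Standard") := by
  simp only [round_to_category, PySem.List.foldl_append_singleton_eq_map, List.nil_append,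
    pvScores, List.map_cons, List.map_nil]
  rw [show |(0:Int) - num| = num - 0 from by rw [abs_of_nonpos (by omega)]; ring]
  rw [show |(5:Int) - num| = num - 5 from by rw [abs_of_nonpos (by omega)]; ring]
  rw [show |(15:Int) - num| = num - 15 from by rw [abs_of_nonpos (by omega)]; ring]
  rw [show |(25:Int) - num| = num - 25 from by rw [abs_of_nonpos (by omega)]; ring]
  rw [show |(32:Int) - num| = num - 32 from by rw [abs_of_nonpos (by omega)]; ring]
  rw [show |(35:Int) - num| = num - 35 from by rw [abs_of_nonpos (by omega)]; ring]
  rw [show |(38:Int) - num| = num - 38 from by rw [abs_of_nonpos (by omega)]; ring]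
  rw [show |(42:Int) - num| = num - 42 from by rw [abs_of_nonpos (by omega)]; ring]
  rw [show |(45:Int) - num| = num - 45 from by rw [abs_of_nonpos (by omega)]; ring]
  rw [show |(48:Int) - num| = num - 48 from by rw [abs_of_nonpos (by omega)]; ring]
  rw [show |(52:Int) - num| = num - 52 from by rw [abs_of_nonpos (by omega)]; ring]
  rw [show |(55:Int) - num| = num - 55 from by rw [abs_of_nonpos (by omega)]; ring]
  rw [show |(58:Int) - num| = num - 58 from by rw [abs_of_nonpos (by omega)]; ring]
  rw [show |(62:Int) - num| = num - 62 from by rw [abs_of_nonpos (by omega)]; ring]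
  rw [show |(65:Int) - num| = num - 65 from by rw [abs_of_nonpos (by omega)]; ring]
  rw [show |(68:Int) - num| = num - 68 from by rw [abs_of_nonpos (by omega)]; ring]
  rw [show |(72:Int) - num| = num - 72 from by rw [abs_of_nonpos (by omega)]; ring]
  rw [show |(75:Int) - num| = num - 75 from by rw [abs_of_nonpos (by omega)]; ring]
  rw [show |(78:Int) - num| = num - 78 from by rw [abs_of_nonpos (by omega)]; ring]
  rw [show |(82:Int) - num| = num - 82 from by rw [abs_of_nonpos (by omega)]; ring]
  rw [show |(85:Int) - num| = num - 85 from by rw [abs_of_nonpos (by omega)]; ring]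
  rw [show |(92:Int) - num| = num - 92 from by rw [abs_of_nonpos (by omega)]; ring]
  rw [show |(100:Int) - num| = num - 100 from by rw [abs_of_nonpos (by omega)]; ring]
  rw [PySem.List.min?_id_cons]
  simp only [List.foldl_cons, List.foldl_nil]
  rw [show min (num - (0:Int)) (num - 5) = num - 5 from by omega]
  rw [show min (num - (5:Int)) (num - 15) = num - 15 from by omega]
  rw [show min (num - (15:Int)) (num - 25) = num - 25 from by omega]
  rw [show min (num - (25:Int)) (num - 32) = num - 32 from by omega]
  rw [show min (num - (32:Int)) (num - 35) = num - 35 from by omega]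
  rw [show min (num - (35:Int)) (num - 38) = num - 38 from by omega]
  rw [show min (num - (38:Int)) (num - 42) = num - 42 from by omega]
  rw [show min (num - (42:Int)) (num - 45) = num - 45 from by omega]
  rw [show min (num - (45:Int)) (num - 48) = num - 48 from by omega]
  rw [show min (num - (48:Int)) (num - 52) = num - 52 from by omega]
  rw [show min (num - (52:Int)) (num - 55) = num - 55 from by omega]
  rw [show min (num - (55:Int)) (num - 58) = num - 58 from by omega]
  rw [show min (num - (58:Int)) (num - 62) = num - 62 from by omega]
  rw [show min (num - (62:Int)) (num - 65) = num - 65 from by omega]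
  rw [show min (num - (65:Int)) (num - 68) = num - 68 from by omega]
  rw [show min (num - (68:Int)) (num - 72) = num - 72 from by omega]
  rw [show min (num - (72:Int)) (num - 75) = num - 75 from by omega]
  rw [show min (num - (75:Int)) (num - 78) = num - 78 from by omega]
  rw [show min (num - (78:Int)) (num - 82) = num - 82 from by omega]
  rw [show min (num - (82:Int)) (num - 85) = num - 85 from by omega]
  rw [show min (num - (85:Int)) (num - 92) = num - 92 from by omega]
  rw [show min (num - (92:Int)) (num - 100) = num - 100 from by omega]
  simp only [Option.getD_some]
  rw [show PySem.List.count ((num - 0) :: [num - 5, num - 15, num - 25, num - 32, num - 35, num - 38, num - 42, num - 45, num - 48, num - 52, num - 55, num - 58, num - 62, num - 65, num - 68, num - 72, num - 75, num - 78, num - 82, num - 85, num - 92, num - 100]) (num - 100) = 1 from by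
    rw [PySem.List.count_eq]
    rw [List.count_cons_of_ne (by omega : num - (0:Int) ≠ num - 100)]
    rw [List.count_cons_of_ne (by omega : num - (5:Int) ≠ num - 100)]
    rw [List.count_cons_of_ne (by omega : num - (15:Int) ≠ num - 100)]
    rw [List.count_cons_of_ne (by omega : num - (25:Int) ≠ num - 100)]
    rw [List.count_cons_of_ne (by omega : num - (32:Int) ≠ num - 100)]
    rw [List.count_cons_of_ne (by omega : num - (35:Int) ≠ num - 100)]
    rw [List.count_cons_of_ne (by omega : num - (38:Int) ≠ num - 100)]
    rw [List.count_cons_of_ne (by omega : num - (42:Int) ≠ num - 100)]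
    rw [List.count_cons_of_ne (by omega : num - (45:Int) ≠ num - 100)]
    rw [List.count_cons_of_ne (by omega : num - (48:Int) ≠ num - 100)]
    rw [List.count_cons_of_ne (by omega : num - (52:Int) ≠ num - 100)]
    rw [List.count_cons_of_ne (by omega : num - (55:Int) ≠ num - 100)]
    rw [List.count_cons_of_ne (by omega : num - (58:Int) ≠ num - 100)]
    rw [List.count_cons_of_ne (by omega : num - (62:Int) ≠ num - 100)]
    rw [List.count_cons_of_ne (by omega : num - (65:Int) ≠ num - 100)]
    rw [List.count_cons_of_ne (by omega : num - (68:Int) ≠ num - 100)]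
    rw [List.count_cons_of_ne (by omega : num - (72:Int) ≠ num - 100)]
    rw [List.count_cons_of_ne (by omega : num - (75:Int) ≠ num - 100)]
    rw [List.count_cons_of_ne (by omega : num - (78:Int) ≠ num - 100)]
    rw [List.count_cons_of_ne (by omega : num - (82:Int) ≠ num - 100)]
    rw [List.count_cons_of_ne (by omega : num - (85:Int) ≠ num - 100)]
    rw [List.count_cons_of_ne (by omega : num - (92:Int) ≠ num - 100)]
    rw [List.count_cons_self, List.count_nil]]
  rw [if_pos rfl]
  rw [PySem.List.index?_cons_of_ne _ (by omega : num - (0:Int) ≠ num - 100)]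
  rw [PySem.List.index?_cons_of_ne _ (by omega : num - (5:Int) ≠ num - 100)]
  rw [PySem.List.index?_cons_of_ne _ (by omega : num - (15:Int) ≠ num - 100)]
  rw [PySem.List.index?_cons_of_ne _ (by omega : num - (25:Int) ≠ num - 100)]
  rw [PySem.List.index?_cons_of_ne _ (by omega : num - (32:Int) ≠ num - 100)]
  rw [PySem.List.index?_cons_of_ne _ (by omega : num - (35:Int) ≠ num - 100)]
  rw [PySem.List.index?_cons_of_ne _ (by omega : num - (38:Int) ≠ num - 100)]
  rw [PySem.List.index?_cons_of_ne _ (by omega : num - (42:Int) ≠ num - 100)]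
  rw [PySem.List.index?_cons_of_ne _ (by omega : num - (45:Int) ≠ num - 100)]
  rw [PySem.List.index?_cons_of_ne _ (by omega : num - (48:Int) ≠ num - 100)]
  rw [PySem.List.index?_cons_of_ne _ (by omega : num - (52:Int) ≠ num - 100)]
  rw [PySem.List.index?_cons_of_ne _ (by omega : num - (55:Int) ≠ num - 100)]
  rw [PySem.List.index?_cons_of_ne _ (by omega : num - (58:Int) ≠ num - 100)]
  rw [PySem.List.index?_cons_of_ne _ (by omega : num - (62:Int) ≠ num - 100)]
  rw [PySem.List.index?_cons_of_ne _ (by omega : num - (65:Int) ≠ num - 100)]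
  rw [PySem.List.index?_cons_of_ne _ (by omega : num - (68:Int) ≠ num - 100)]
  rw [PySem.List.index?_cons_of_ne _ (by omega : num - (72:Int) ≠ num - 100)]
  rw [PySem.List.index?_cons_of_ne _ (by omega : num - (75:Int) ≠ num - 100)]
  rw [PySem.List.index?_cons_of_ne _ (by omega : num - (78:Int) ≠ num - 100)]
  rw [PySem.List.index?_cons_of_ne _ (by omega : num - (82:Int) ≠ num - 100)]
  rw [PySem.List.index?_cons_of_ne _ (by omega : num - (85:Int) ≠ num - 100)]
  rw [PySem.List.index?_cons_of_ne _ (by omega : num - (92:Int) ≠ num - 100)]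
  rw [PySem.List.index?_cons_self]
  norm_num [PySem.List.pyGet?, PySem.List.pyIdx?, determine_category, pvScores]
  all_goals decide

theorem rtc_alt_big (num : Int) (h : 100 < num) : round_to_category_alt num = (100, "Aurum Standard") := by
  simp only [round_to_category_alt, bsLoop_big num h pvScores.length 0 pvScores.length (by simp [pvScores]) (by omega)]
  norm_num [PySem.List.pyGet?, PySem.List.pyIdx?, determine_category, pvScores]

-- ===== VERDICT (by name: the statement is the Claim_ definition above) =====
theorem round_to_category_spec : Claim_equal_round_to_category := by
  intro num hdom
  unfold Spec_round_to_category
  rcases lt_or_ge num 0 with h | h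
  · rw [rtc_neg num h, rtc_alt_neg num h]
  · rcases le_or_gt num 100 with h2 | h2
    · interval_cases num <;> decide
    · rw [rtc_big num h2, rtc_alt_big num h2]
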